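-- pv_equiv track=rewrite | github.com/Hummerek/szakdolgozat | DecisionTreeClassifier/DecisionTreeClassifierClass.py | __there_are_different_elements_in__
-- ===== SOURCE A (Python) =====
-- def __there_are_different_elements_in__(list):
--   result = False
--   firsttime = True
--   type = 0
--   for element in list:
--     if(firsttime == True):
--       type = element[2]
--       firsttime = False
--     if(element[2]!=type):
--       result = True
--   return result
-- ===== SOURCE B (Python) =====
-- def __there_are_different_elements_in__(list):
--   return len({element[2] for element in list}) > 1
-- ===== Notes on version B (the rewrite author's own statement) =====
-- stated objective: simpler
-- what changed: Replaced A's remember-first-value-and-compare scan (three loop variables) with a one-line set comprehension over the index-2 fields and a distinct-count test len(vals) > 1.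
import Mathlib
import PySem

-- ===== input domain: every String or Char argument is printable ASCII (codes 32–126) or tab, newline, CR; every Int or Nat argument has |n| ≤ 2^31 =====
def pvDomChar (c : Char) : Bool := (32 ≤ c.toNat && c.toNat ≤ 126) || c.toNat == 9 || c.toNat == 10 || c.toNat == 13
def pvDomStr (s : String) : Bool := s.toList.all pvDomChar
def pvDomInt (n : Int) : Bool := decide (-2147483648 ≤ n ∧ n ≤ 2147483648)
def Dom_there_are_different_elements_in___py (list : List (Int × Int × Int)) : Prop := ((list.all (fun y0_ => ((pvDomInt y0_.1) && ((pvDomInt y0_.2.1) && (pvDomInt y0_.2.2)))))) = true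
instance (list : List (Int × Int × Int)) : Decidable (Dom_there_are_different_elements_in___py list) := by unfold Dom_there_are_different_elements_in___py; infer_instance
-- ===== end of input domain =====

-- B replaces A's remember-first-and-compare scan by a set of the index-2 values and a distinct-count test (simpler).

-- ===== PORT A =====
-- loop body of A; state is (result, firsttime, type)
def pvStepA (st : Bool × Bool × Int) (element : Int × Int × Int) : Bool × Bool × Int :=
  let st1 : Bool × Bool × Int :=
    if st.2.1 = true then (st.1, false, element.2.2) else st
  if element.2.2 ≠ st1.2.2 then (true, st1.2.1, st1.2.2) else st1

def there_are_different_elements_in___py (list : List (Int × Int × Int)) : Bool :=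
  (list.foldl pvStepA (false, true, 0)).1

-- ===== PORT B =====
def there_are_different_elements_in___py_alt (list : List (Int × Int × Int)) : Bool :=
  decide (1 < (PySem.Set.ofList (list.map (fun element => element.2.2))).length)

-- ===== PRECONDITION & SPEC =====
def Spec_there_are_different_elements_in___py (list : List (Int × Int × Int)) (out : Bool) : Prop := out = there_are_different_elements_in___py_alt list
instance (list : List (Int × Int × Int)) (out : Bool) : Decidable (Spec_there_are_different_elements_in___py list out) := by unfold Spec_there_are_different_elements_in___py; infer_instance

-- ===== CLAIM (what is proved, stated in full; the proofs are below) =====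
def Claim_equal_there_are_different_elements_in___py : Prop := ∀ (list : List (Int × Int × Int)), Dom_there_are_different_elements_in___py list → Spec_there_are_different_elements_in___py list (there_are_different_elements_in___py list)

-- ===== LEMMAS AND PROOFS =====

-- After the first element, A's loop is: result ||= (element[2] != type), with type fixed.
theorem pvFoldA (xs : List (Int × Int × Int)) (r : Bool) (t : Int) :
    (xs.foldl pvStepA (r, false, t)).1 = (r || xs.any (fun e => e.2.2 ≠ t)) := by
  induction xs generalizing r with
  | nil => simp
  | cons x xs ih =>
    have hstep : pvStepA (r, false, t) x = ((r || decide (x.2.2 ≠ t)), false, t) := by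
      by_cases h : x.2.2 = t <;> simp [pvStepA, h]
    rw [List.foldl_cons, hstep, ih]
    simp [Bool.or_assoc]

-- Folding Set.add over ts from a nonempty seed s exceeds one element iff s already does or some element of ts is new.
theorem pvSetLen (ts : List Int) (s : List Int) (hs : s ≠ []) :
    (1 < (ts.foldl PySem.Set.add s).length) ↔ (1 < s.length ∨ ∃ x ∈ ts, x ∉ s) := by
  induction ts generalizing s with
  | nil => simp
  | cons x ts ih =>
    rw [List.foldl_cons]
    by_cases h : x ∈ s
    · have hadd : PySem.Set.add s x = s := by simp [PySem.Set.add, h]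
      rw [hadd, ih s hs]
      simp only [List.mem_cons]
      constructor
      · rintro (h1 | ⟨y, hy, hny⟩)
        · exact Or.inl h1
        · exact Or.inr ⟨y, Or.inr hy, hny⟩
      · rintro (h1 | ⟨y, (rfl | hy), hny⟩)
        · exact Or.inl h1
        · exact absurd h hny
        · exact Or.inr ⟨y, hy, hny⟩
    · have hadd : PySem.Set.add s x = s ++ [x] := by simp [PySem.Set.add, h]
      rw [hadd, ih (s ++ [x]) (by simp)]
      have hl : 1 < (s ++ [x]).length := by
        cases s with
        | nil => exact absurd rfl hs
        | cons a as => simp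
      exact iff_of_true (Or.inl hl) (Or.inr ⟨x, List.mem_cons_self .., h⟩)

-- ===== VERDICT (by name: the statement is the Claim_ definition above) =====
theorem there_are_different_elements_in___py_spec : Claim_equal_there_are_different_elements_in___py := by
  intro list _
  unfold Spec_there_are_different_elements_in___py there_are_different_elements_in___py there_are_different_elements_in___py_alt
  cases list with
  | nil => decide
  | cons x xs =>
    have hstep : pvStepA (false, true, 0) x = (false, false, x.2.2) := by simp [pvStepA]
    rw [List.foldl_cons, hstep, pvFoldA, List.map_cons]
    have hof : PySem.Set.ofList (x.2.2 :: xs.map (fun e => e.2.2)) =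
        (xs.map (fun e => e.2.2)).foldl PySem.Set.add [x.2.2] := by
      simp [PySem.Set.ofList_eq_foldl, PySem.Set.add, PySem.Set.empty]
    have key : (1 < ((xs.map (fun e => e.2.2)).foldl PySem.Set.add [x.2.2]).length) ↔
        ∃ e ∈ xs, e.2.2 ≠ x.2.2 := by
      rw [pvSetLen _ _ (by simp)]
      simp
      tauto
    rw [hof, Bool.eq_iff_iff]
    simp [key, List.any_eq_true]
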